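-- pv_equiv track=rewrite | github.com/jovian34/j34_roman | roman.py | letter_repeated_more_than_permitted
-- ===== SOURCE A (Python) =====
-- fives = ["D", "L", "V"]
--
-- def letter_repeated_more_than_permitted(letters):
--     repeat = 0
--     last = None
--     for letter in letters:
--         if last == letter:
--             repeat += 1
--         else:
--             repeat = 0
--             last = letter
--         if letter in fives and repeat == 1:
--             return True
--         if repeat == 3:
--             return True
--     return False
-- ===== SOURCE B (Python) =====
-- fives = ["D", "L", "V"]
--
-- def letter_repeated_more_than_permitted(letters):
--     s = list(letters)
--     while s:
--         c = s[0]
--         run = 1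
--         while run < len(s) and s[run] == c:
--             run += 1
--         if (c in fives and run >= 2) or run >= 4:
--             return True
--         s = s[run:]
--     return False
-- ===== Notes on version B (the rewrite author's own statement) =====
-- stated objective: alternative
-- what changed: B splits the string into maximal runs of identical letters and tests each run's length (>=2 for a 'fives' letter, >=4 otherwise), instead of A's per-character scan that carries a consecutive-repeat counter and last-seen letter across iterations.
import Mathlib
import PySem

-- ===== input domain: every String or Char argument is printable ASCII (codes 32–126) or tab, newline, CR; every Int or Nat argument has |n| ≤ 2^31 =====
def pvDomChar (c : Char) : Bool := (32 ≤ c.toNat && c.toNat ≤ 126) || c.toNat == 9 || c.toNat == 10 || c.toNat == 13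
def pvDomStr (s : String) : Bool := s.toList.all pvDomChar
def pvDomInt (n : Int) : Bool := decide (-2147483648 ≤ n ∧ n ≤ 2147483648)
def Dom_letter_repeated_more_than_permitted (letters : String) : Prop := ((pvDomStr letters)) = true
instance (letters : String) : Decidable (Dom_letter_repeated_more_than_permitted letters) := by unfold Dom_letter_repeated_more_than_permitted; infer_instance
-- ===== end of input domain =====

-- B replaces A's per-character scan carrying a repeat counter and last-seen letter by a
-- decomposition of the string into maximal runs of identical letters, testing each run's length.

-- the module constant: fives = ["D", "L", "V"] (single-char strings; the membership test
-- 'letter in fives' compares one character, so List Char is the exact model)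
def fivesConst : List Char := ['D', 'L', 'V']

-- ===== PORT A =====
-- the for-loop of A: state = (repeat, last); branches in source order
def loopA : List Char → Nat → Option Char → Bool
  | [], _, _ => false
  | letter :: rest, rpt, last =>
    let rpt' := if last = some letter then rpt + 1 else 0
    let last' := if last = some letter then last else some letter
    if (fivesConst.contains letter && rpt' == 1) || rpt' == 3 then true
    else loopA rest rpt' last'

def letter_repeated_more_than_permitted (letters : String) : Bool :=
  loopA letters.toList 0 none

-- ===== PORT B =====
-- the outer while-loop of Source B; the inner while-loop counting the matching prefix
-- (run = 1 + number of leading chars of the tail equal to c) is takeWhile, and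
-- s = s[run:] drops exactly that matching prefix of the tail.
def loopB : List Char → Bool
  | [] => false
  | c :: rest =>
    let run := 1 + (rest.takeWhile (fun x => x == c)).length
    if (fivesConst.contains c && decide (2 ≤ run)) || decide (4 ≤ run) then true
    else loopB (rest.dropWhile (fun x => x == c))
termination_by l => l.length
decreasing_by
  simpa using Nat.lt_succ_of_le (rest.length_dropWhile_le (fun x => x == c))

def letter_repeated_more_than_permitted_alt (letters : String) : Bool :=
  loopB letters.toList

-- ===== PRECONDITION & SPEC =====
def Spec_letter_repeated_more_than_permitted (letters : String) (out : Bool) : Prop := out = letter_repeated_more_than_permitted_alt letters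
instance (letters : String) (out : Bool) : Decidable (Spec_letter_repeated_more_than_permitted letters out) := by unfold Spec_letter_repeated_more_than_permitted; infer_instance

-- ===== CLAIM (what is proved, stated in full; the proofs are below) =====
def Claim_equal_letter_repeated_more_than_permitted : Prop := ∀ (letters : String), Dom_letter_repeated_more_than_permitted letters → Spec_letter_repeated_more_than_permitted letters (letter_repeated_more_than_permitted letters)

-- ===== LEMMAS AND PROOFS =====

-- a step of A's loop on a letter different from `last` resets the state
theorem loopA_fresh (h : Char) (t : List Char) (r : Nat) (last : Option Char)
    (hne : last ≠ some h) : loopA (h :: t) r last = loopA t 0 (some h) := by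
  simp [loopA, hne]

-- processing a block of k copies of c with trailing-run state (r, some c)
theorem loopA_run (k : Nat) (rest : List Char) (c : Char) (r : Nat) :
    loopA (List.replicate k c ++ rest) r (some c) =
      if (fivesConst.contains c = true ∧ r = 0 ∧ 1 ≤ k) ∨ (r ≤ 2 ∧ 3 ≤ r + k)
      then true else loopA rest (r + k) (some c) := by
  induction k generalizing r with
  | zero => simp; omega
  | succ k ih =>
    rw [List.replicate_succ, List.cons_append]
    have hstep : loopA (c :: (List.replicate k c ++ rest)) r (some c) =
        (if (fivesConst.contains c && (r+1) == 1) || (r+1) == 3 then true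
         else loopA (List.replicate k c ++ rest) (r+1) (some c)) := by
      simp only [loopA, if_true]
    rw [hstep, ih, show r + 1 + k = r + (k + 1) from by omega]
    apply Bool.eq_iff_iff.mpr
    by_cases hm : c ∈ fivesConst <;>
      by_cases hX : loopA rest (r + (k + 1)) (some c) = true <;>
        simp [hm, hX] <;> omega

-- the tail left after dropping the maximal run does not start with c
theorem head_dropWhile_ne (rest : List Char) (c h : Char) (t : List Char)
    (hd : rest.dropWhile (fun x => x == c) = h :: t) : h ≠ c := by
  intro hc
  have := List.head_dropWhile_not (fun x => x == c) (l := rest)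
    (by simp [hd])
  simp [hd, hc] at this

theorem loopA_eq_loopB : ∀ (n : Nat) (l : List Char), l.length ≤ n →
    loopA l 0 none = loopB l := by
  intro n
  induction n with
  | zero => intro l hl; simp at hl; simp [hl, loopA, loopB]
  | succ n ih =>
    intro l hl
    match l with
    | [] => simp [loopA, loopB]
    | c :: rest =>
      have hsplit : rest = rest.takeWhile (fun x => x == c) ++ rest.dropWhile (fun x => x == c) :=
        (List.takeWhile_append_dropWhile).symm
      have hrepl : rest.takeWhile (fun x => x == c)
          = List.replicate (rest.takeWhile (fun x => x == c)).length c := by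
        apply List.eq_replicate_of_mem
        intro b hb
        have := List.mem_takeWhile_imp hb
        simpa using this
      set k := (rest.takeWhile (fun x => x == c)).length with hk
      set d := rest.dropWhile (fun x => x == c) with hdd
      have hstep : loopA (c :: rest) 0 none = loopA rest 0 (some c) :=
        loopA_fresh c rest 0 none (by simp)
      have hlen_d : d.length ≤ rest.length := List.length_dropWhile_le _ _
      have hA : loopA rest 0 (some c) =
          if (fivesConst.contains c = true ∧ 1 ≤ k) ∨ 3 ≤ k
          then true else loopA d k (some c) := by
        conv_lhs => rw [hsplit, hrepl]
        rw [loopA_run, Nat.zero_add]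
        congr 1
        · simp
        
      have htail : loopA d k (some c) = loopB d := by
        match hdm : d with
        | [] => simp [loopA, loopB]
        | h :: t =>
          have hne : h ≠ c := head_dropWhile_ne rest c h t (by rw [← hdd]; try exact hdm)
          rw [loopA_fresh h t k (some c) (by simpa using fun e => (hne e.symm).elim)]
          have : loopA (h :: t) 0 none = loopB (h :: t) := by
            apply ih
            have h1 : t.length < d.length := by rw [hdm]; simp
            have h2 : (c :: rest).length = rest.length + 1 := by simp
            omega
          rw [← this, loopA_fresh h t 0 none (by simp)]
      have hB : loopB (c :: rest) =
          if (fivesConst.contains c && decide (2 ≤ 1 + k)) || decide (4 ≤ 1 + k)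
          then true else loopB d := by rw [loopB]
      rw [hstep, hA, hB, htail]
      simp only [show (2 ≤ 1 + k) = (1 ≤ k) from by simp; omega,
        show (4 ≤ 1 + k) = (3 ≤ k) from by simp; omega]
      apply Bool.eq_iff_iff.mpr
      by_cases hm : c ∈ fivesConst <;> simp [hm]

-- ===== VERDICT (by name: the statement is the Claim_ definition above) =====
theorem letter_repeated_more_than_permitted_spec : Claim_equal_letter_repeated_more_than_permitted := by
  intro letters _
  unfold Spec_letter_repeated_more_than_permitted letter_repeated_more_than_permitted letter_repeated_more_than_permitted_alt
  exact loopA_eq_loopB letters.toList.length letters.toList le_rfl
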